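-- pv_equiv track=rewrite | github.com/Miracle-QCC/CVIAI_TOOL | wash_ir_data_label.py | get_retina_kps
-- ===== SOURCE A (Python) =====
-- def get_retina_kps(kps):
--     tmp_list = []
--     i = 0
--     for kp in kps:
--         i += 1
--         tmp_list.append(kp)
--
--         if i % 2 == 0:
--             tmp_list.append("0")
--     return " ".join(tmp_list)
-- ===== SOURCE B (Python) =====
-- def get_retina_kps(kps):
--     it = iter(kps)
--     parts = []
--     for a in it:
--         b = next(it, None)
--         parts.append(a if b is None else " ".join([a, b, "0"]))
--     return " ".join(parts)
-- ===== Notes on version B (the rewrite author's own statement) =====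
-- stated objective: alternative
-- what changed: B consumes the list two elements at a time, pre-joining each full pair with its '0' marker into one part, instead of A's element-by-element loop with a parity counter deciding when to append '0'.
import Mathlib
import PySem

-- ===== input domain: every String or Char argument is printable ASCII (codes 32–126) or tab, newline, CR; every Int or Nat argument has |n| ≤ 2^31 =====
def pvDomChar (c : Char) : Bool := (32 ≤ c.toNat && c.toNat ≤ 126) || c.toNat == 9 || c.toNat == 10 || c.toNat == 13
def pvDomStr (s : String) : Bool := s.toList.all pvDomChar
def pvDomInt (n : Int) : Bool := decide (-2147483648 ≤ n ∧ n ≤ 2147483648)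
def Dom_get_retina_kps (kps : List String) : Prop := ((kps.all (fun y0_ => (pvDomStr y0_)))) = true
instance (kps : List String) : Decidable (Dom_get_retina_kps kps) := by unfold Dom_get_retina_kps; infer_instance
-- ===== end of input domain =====

-- B replaces A's element-by-element loop with a parity counter by a pair-chunking loop
-- that consumes two elements at a time (objective: alternative decomposition; same cost).

-- ===== PORT A =====
-- the loop body: i += 1; tmp_list.append(kp); if i % 2 == 0: tmp_list.append("0")
def stepA (st : Int × List String) (kp : String) : Int × List String :=
  let i := st.1 + 1
  let tmp := st.2 ++ [kp]
  if PySem.Int.mod i 2 = 0 then (i, tmp ++ ["0"]) else (i, tmp)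

def get_retina_kps (kps : List String) : String :=
  PySem.Str.join " " (kps.foldl stepA (0, [])).2

-- ===== PORT B =====
-- for a in it: b = next(it, None); parts.append(a if b is None else " ".join([a, b, "0"]))
-- (the iterator yields the list's remaining elements: two taken per iteration, a lone
--  final element appended unchanged, an exhausted iterator ends the loop)
def altLoop (parts : List String) : List String → List String
  | a :: b :: t => altLoop (parts ++ [PySem.Str.join " " [a, b, "0"]]) t
  | rest => parts ++ rest

def get_retina_kps_alt (kps : List String) : String :=
  PySem.Str.join " " (altLoop [] kps)

-- ===== PRECONDITION & SPEC =====
def Spec_get_retina_kps (kps : List String) (out : String) : Prop := out = get_retina_kps_alt kps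
instance (kps : List String) (out : String) : Decidable (Spec_get_retina_kps kps out) := by unfold Spec_get_retina_kps; infer_instance

-- ===== CLAIM (what is proved, stated in full; the proofs are below) =====
def Claim_equal_get_retina_kps : Prop := ∀ (kps : List String), Dom_get_retina_kps kps → Spec_get_retina_kps kps (get_retina_kps kps)

-- ===== LEMMAS AND PROOFS =====

-- A's tmp_list, characterised: "0" after every completed pair
def withZeros : List String → List String
  | a :: b :: t => a :: b :: "0" :: withZeros t
  | rest => rest

-- B's parts ++ rest, characterised: each full pair is pre-joined
def pairJoined : List String → List String
  | a :: b :: t => PySem.Str.join " " [a, b, "0"] :: pairJoined t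
  | rest => rest

lemma stepA_loop : ∀ (t : List String) (i : Int) (acc : List String),
    PySem.Int.mod i 2 = 0 → (t.foldl stepA (i, acc)).2 = acc ++ withZeros t := by
  intro t
  induction t using withZeros.induct with
  | case1 a b t ih =>
    intro i acc hi
    have hdvd : (2:Int) ∣ i := (PySem.Int.mod_eq_zero_iff_dvd i 2).mp hi
    have h1 : ¬ (2:Int) ∣ (i + 1) := by omega
    have h2 : (2:Int) ∣ (i + 1 + 1) := by omega
    have e1 : stepA (i, acc) a = (i + 1, acc ++ [a]) := by
      simp [stepA, h1]
    have e2 : stepA (i + 1, acc ++ [a]) b = (i + 1 + 1, acc ++ [a] ++ [b] ++ ["0"]) := by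
      simp [stepA, h2]
    rw [List.foldl_cons, e1, List.foldl_cons, e2,
        ih _ _ ((PySem.Int.mod_eq_zero_iff_dvd _ 2).mpr h2)]
    simp [withZeros]
  | case2 rest h =>
    intro i acc hi
    have hdvd : (2:Int) ∣ i := (PySem.Int.mod_eq_zero_iff_dvd i 2).mp hi
    cases rest with
    | nil => simp [withZeros]
    | cons a r =>
      cases r with
      | nil =>
        have h1 : ¬ (2:Int) ∣ (i + 1) := by omega
        simp [stepA, h1, withZeros]
      | cons b t => exact (h a b t rfl).elim

lemma altLoop_eq : ∀ (t : List String) (parts : List String),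
    altLoop parts t = parts ++ pairJoined t := by
  intro t
  induction t using pairJoined.induct with
  | case1 a b t ih =>
    intro parts
    rw [altLoop, ih, pairJoined]
    simp
  | case2 rest h =>
    intro parts
    cases rest with
    | nil => simp [altLoop, pairJoined]
    | cons a r =>
      cases r with
      | nil => simp [altLoop, pairJoined]
      | cons b t => exact (h a b t rfl).elim

-- joining a pre-joined pair string flattens into joining the three pieces
lemma intercalate_flat (sep A B Z : List Char) (l : List (List Char)) :
    sep.intercalate (sep.intercalate [A, B, Z] :: l) = sep.intercalate (A :: B :: Z :: l) := by
  cases l with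
  | nil => simp [List.intercalate]
  | cons x xs => simp [List.intercalate]

lemma intercalate_cons_ne (sep x : List Char) (l : List (List Char)) (h : l ≠ []) :
    sep.intercalate (x :: l) = x ++ sep ++ sep.intercalate l := by
  cases l with
  | nil => exact absurd rfl h
  | cons y ys => simp [List.intercalate]

lemma join_pairJoined : ∀ (t : List String),
    PySem.Str.join " " (pairJoined t) = PySem.Str.join " " (withZeros t) := by
  intro t
  induction t using withZeros.induct with
  | case1 a b t ih =>
    apply String.toList_inj.mp
    have hij := congrArg String.toList ih
    rw [pairJoined, withZeros]
    simp only [pysem, PySem.Str.toList_join, PySem.Chars.join, List.map_cons, List.map_nil] at hij ⊢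
    rw [intercalate_flat]
    cases t with
    | nil => simp [pairJoined, withZeros]
    | cons c t' =>
      have hp : List.map String.toList (pairJoined (c :: t')) ≠ [] := by
        cases t' <;> simp [pairJoined]
      have hw : List.map String.toList (withZeros (c :: t')) ≠ [] := by
        cases t' <;> simp [withZeros]
      rw [intercalate_cons_ne _ _ _ (by simp), intercalate_cons_ne _ _ _ (by simp),
          intercalate_cons_ne _ _ _ hp]
      rw [intercalate_cons_ne _ _ _ (by simp), intercalate_cons_ne _ _ _ (by simp),
          intercalate_cons_ne _ _ _ hw]
      rw [hij]
  | case2 rest h =>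
    cases rest with
    | nil => rfl
    | cons a r =>
      cases r with
      | nil => rfl
      | cons b t => exact (h a b t rfl).elim

-- ===== VERDICT (by name: the statement is the Claim_ definition above) =====
theorem get_retina_kps_spec : Claim_equal_get_retina_kps := by
  intro kps _
  unfold Spec_get_retina_kps get_retina_kps get_retina_kps_alt
  rw [stepA_loop kps 0 [] rfl, altLoop_eq]
  simpa using (join_pairJoined kps).symm
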